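-- pv_equiv track=rewrite | github.com/dilroseR/Coding-questions | Problem 14/Main.py | solve
-- ===== SOURCE A (Python) =====
-- def solve(votes):
--     lst=[]
--     for i in range(0,len(votes)):
--         lst.append(votes[i][1])
--     a=list(set(lst))
--     if len(a)==len(lst):
--         return False
--     else:
--         return True
-- ===== SOURCE B (Python) =====
-- def solve(votes):
--     seen = set()
--     for v in votes:
--         x = v[1]
--         if x in seen:
--             return True
--         seen.add(x)
--     return False
-- ===== Notes on version B (the rewrite author's own statement) =====
-- stated objective: simpler
-- what changed: Replaces materialising the full list of second elements plus a set-then-length comparison with a single incremental pass that maintains a seen-set and returns True at the first repeated second element.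
import Mathlib
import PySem

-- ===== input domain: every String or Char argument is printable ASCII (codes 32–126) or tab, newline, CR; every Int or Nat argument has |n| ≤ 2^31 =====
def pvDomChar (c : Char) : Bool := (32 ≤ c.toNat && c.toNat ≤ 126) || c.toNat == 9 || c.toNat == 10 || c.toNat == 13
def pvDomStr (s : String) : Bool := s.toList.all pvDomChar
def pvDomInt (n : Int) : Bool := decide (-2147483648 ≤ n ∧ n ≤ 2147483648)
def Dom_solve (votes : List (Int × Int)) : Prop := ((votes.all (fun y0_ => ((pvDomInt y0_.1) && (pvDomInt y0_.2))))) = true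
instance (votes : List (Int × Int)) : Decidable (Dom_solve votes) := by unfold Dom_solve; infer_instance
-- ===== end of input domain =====

-- B replaces A's "collect all second elements, dedup with set(), compare lengths" with a
-- single early-exit pass maintaining a seen-set (objective: simpler).

-- ===== PORT A =====
def solve (votes : List (Int × Int)) : Bool :=
  -- lst = []; for i in range(0, len(votes)): lst.append(votes[i][1])
  let lst : List Int :=
    (PySem.List.pyRange 0 votes.length 1).foldl
      (fun acc i => acc ++ [(PySem.List.pyGetD votes i (0, 0)).2]) []
  -- a = list(set(lst)); only len(a) is used, which is order-independent
  let a : PySem.Set Int := PySem.Set.ofList lst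
  if a.length = lst.length then false else true

-- ===== PORT B =====
def solveAltGo (seen : PySem.Set Int) : List (Int × Int) → Bool
  | [] => false
  | v :: rest =>
    if PySem.Set.contains seen v.2 then true
    else solveAltGo (PySem.Set.add seen v.2) rest

def solve_alt (votes : List (Int × Int)) : Bool :=
  solveAltGo PySem.Set.empty votes

-- ===== PRECONDITION & SPEC =====
def Spec_solve (votes : List (Int × Int)) (out : Bool) : Prop := out = solve_alt votes
instance (votes : List (Int × Int)) (out : Bool) : Decidable (Spec_solve votes out) := by unfold Spec_solve; infer_instance

-- ===== CLAIM (what is proved, stated in full; the proofs are below) =====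
def Claim_equal_solve : Prop := ∀ (votes : List (Int × Int)), Dom_solve votes → Spec_solve votes (solve votes)

-- ===== LEMMAS AND PROOFS =====

theorem foldl_append_snd (votes : List (Int × Int)) (acc : List Int) :
    votes.foldl (fun acc v => acc ++ [v.2]) acc = acc ++ votes.map Prod.snd := by
  induction votes generalizing acc with
  | nil => simp
  | cons v rest ih => simp [List.foldl, ih]

theorem lst_eq_map (votes : List (Int × Int)) :
    (PySem.List.pyRange 0 votes.length 1).foldl
      (fun acc i => acc ++ [(PySem.List.pyGetD votes i (0, 0)).2]) []
    = votes.map Prod.snd := by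
  have h := PySem.List.foldl_pyRange_pyGetD (a := (0 : Int)) (xs := votes)
    (f := fun (acc : List Int) (v : Int × Int) => acc ++ [v.2]) (d := ((0, 0) : Int × Int))
    (init := ([] : List Int)) (by norm_num)
  have h2 : List.foldl (fun acc v => acc ++ [v.2]) [] votes = votes.map Prod.snd := by
    simpa using foldl_append_snd votes []
  simpa [PySem.List.len, h2] using h

theorem ofList_length_eq_iff (l : List Int) :
    (PySem.Set.ofList l).length = l.length ↔ l.Nodup := by
  have hto : (PySem.Set.ofList l).toFinset = l.toFinset := by
    ext x; simp [List.mem_toFinset, PySem.Set.mem_ofList]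
  have hcard : (PySem.Set.ofList l).toFinset.card = (PySem.Set.ofList l).length :=
    List.toFinset_card_of_nodup (PySem.Set.nodup_ofList l)
  constructor
  · intro h
    have hdl : l.dedup.length = l.length := by
      rw [← List.card_toFinset, ← hto, hcard, h]
    have : l.dedup = l := (List.dedup_sublist l).eq_of_length hdl
    exact List.dedup_eq_self.mp this
  · intro h
    rw [← hcard, hto, List.toFinset_card_of_nodup h]

theorem go_iff (vs : List (Int × Int)) (seen : PySem.Set Int) :
    solveAltGo seen vs = true ↔
      ¬ ((vs.map Prod.snd).Nodup ∧ ∀ x ∈ vs.map Prod.snd, x ∉ seen) := by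
  induction vs generalizing seen with
  | nil => simp [solveAltGo]
  | cons v rest ih =>
    by_cases h : v.2 ∈ seen
    · simp [solveAltGo, PySem.Set.contains, h]
    · have hc : PySem.Set.contains seen v.2 = false := by
        simp [PySem.Set.contains, h]
      simp only [solveAltGo, hc, if_neg Bool.false_ne_true, ih,
        List.map_cons, List.nodup_cons, List.mem_cons]
      constructor
      · intro hne ⟨⟨hnm, hnd⟩, hall⟩
        exact hne ⟨hnd, fun x hx => by
          have := hall x (Or.inr hx)
          simp [PySem.Set.mem_add]
          exact ⟨this, fun he => hnm (he ▸ hx)⟩⟩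
      · intro hne ⟨hnd, hall⟩
        refine hne ⟨⟨?_, hnd⟩, ?_⟩
        · intro hmem
          have := hall v.2 hmem
          simp [PySem.Set.mem_add] at this
        · rintro x (rfl | hx)
          · exact h
          · have := hall x hx
            simp [PySem.Set.mem_add] at this
            exact this.1

-- ===== VERDICT (by name: the statement is the Claim_ definition above) =====
theorem solve_spec : Claim_equal_solve := by
  intro votes _
  unfold Spec_solve solve solve_alt
  rw [lst_eq_map]
  have hb := go_iff votes PySem.Set.empty
  rw [show PySem.Set.empty = ([] : List Int) from rfl] at hb ⊢
  by_cases hnd : (votes.map Prod.snd).Nodup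
  · rw [if_pos ((ofList_length_eq_iff _).mpr hnd)]
    symm; rw [Bool.eq_false_iff]
    intro h
    exact (hb.mp h) ⟨hnd, by simp⟩
  · rw [if_neg (fun h => hnd ((ofList_length_eq_iff _).mp h))]
    symm; rw [hb]
    intro ⟨h, _⟩; exact hnd h
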